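-- pv_equiv track=rewrite | github.com/csaroff/advent-of-code | 2024/09/main.py | get_updated_file_blocks_fragmented
-- ===== SOURCE A (Python) =====
-- from copy import deepcopy
--
-- def get_updated_file_blocks_fragmented(file_blocks):
--     file_blocks = deepcopy(file_blocks)
--     i, j = 0, len(file_blocks) - 1
--     while i < j:
--         if file_blocks[i] is None:
--             file_blocks[i] = file_blocks[j]
--             file_blocks[j] = None
--             j -= 1
--             continue
--
--         if file_blocks[i] is not None:
--             i += 1
--     return file_blocks
-- ===== SOURCE B (Python) =====
-- from collections import deque
--
-- def get_updated_file_blocks_fragmented(file_blocks):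
--     vals = deque(b for b in file_blocks if b is not None)
--     out = []
--     for b in file_blocks:
--         if not vals:
--             out.append(None)
--         elif b is not None:
--             out.append(vals.popleft())
--         else:
--             out.append(vals.pop())
--     return out
-- ===== Notes on version B (the rewrite author's own statement) =====
-- stated objective: simpler
-- what changed: Replaced the in-place converging two-pointer loop (with a non-advancing swap branch) by a single forward pass that fills each position from a deque of the non-None values (popleft on kept values, pop on gaps, None once empty).
import Mathlib
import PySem

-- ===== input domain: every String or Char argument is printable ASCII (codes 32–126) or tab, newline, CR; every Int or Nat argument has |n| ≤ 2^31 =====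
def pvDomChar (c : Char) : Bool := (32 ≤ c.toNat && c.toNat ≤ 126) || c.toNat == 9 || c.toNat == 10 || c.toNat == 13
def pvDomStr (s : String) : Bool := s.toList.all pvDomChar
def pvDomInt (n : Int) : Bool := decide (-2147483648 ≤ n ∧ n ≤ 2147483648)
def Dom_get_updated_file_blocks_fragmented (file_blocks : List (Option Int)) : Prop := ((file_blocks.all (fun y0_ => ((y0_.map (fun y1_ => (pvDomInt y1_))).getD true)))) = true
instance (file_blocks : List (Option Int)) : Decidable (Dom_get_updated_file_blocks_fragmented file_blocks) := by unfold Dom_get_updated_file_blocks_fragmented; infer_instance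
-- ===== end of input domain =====

-- B replaces A's in-place converging two-pointer loop by a single forward pass
-- over a deque of the non-None values; same return value, chosen for simplicity.

-- ===== PORT A =====
-- the while loop of A: i, j converging pointers over the (copied) list
def pvAloop (fb : List (Option Int)) (i j : Int) : List (Option Int) :=
  if h : i < j then
    if PySem.List.pyGetD fb i none = none then
      pvAloop (PySem.List.pySetD (PySem.List.pySetD fb i (PySem.List.pyGetD fb j none)) j none) i (j - 1)
    else
      pvAloop fb (i + 1) j
  else fb
termination_by (j - i).toNat
decreasing_by all_goals omega

def get_updated_file_blocks_fragmented (file_blocks : List (Option Int)) : List (Option Int) :=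
  -- deepcopy is the identity on an immutable value
  pvAloop file_blocks 0 ((file_blocks.length : Int) - 1)

-- ===== PORT B =====
-- the for loop of B: one output element per input element, consuming the deque `vals`
def pvBloop : List (Option Int) → List Int → List (Option Int)
  | [], _ => []
  | b :: os, vals =>
    match vals with
    | [] => none :: pvBloop os []
    | v :: vs =>
      if b.isSome then some v :: pvBloop os vs
      else some (vs.getLastD v) :: pvBloop os ((v :: vs).dropLast)

def get_updated_file_blocks_fragmented_alt (file_blocks : List (Option Int)) : List (Option Int) :=
  pvBloop file_blocks (file_blocks.filterMap id)

-- ===== PRECONDITION & SPEC =====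
def Spec_get_updated_file_blocks_fragmented (file_blocks : List (Option Int)) (out : List (Option Int)) : Prop := out = get_updated_file_blocks_fragmented_alt file_blocks
instance (file_blocks : List (Option Int)) (out : List (Option Int)) : Decidable (Spec_get_updated_file_blocks_fragmented file_blocks out) := by unfold Spec_get_updated_file_blocks_fragmented; infer_instance

-- ===== CLAIM (what is proved, stated in full; the proofs are below) =====
def Claim_equal_get_updated_file_blocks_fragmented : Prop := ∀ (file_blocks : List (Option Int)), Dom_get_updated_file_blocks_fragmented file_blocks → Spec_get_updated_file_blocks_fragmented file_blocks (get_updated_file_blocks_fragmented file_blocks)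

-- ===== LEMMAS AND PROOFS =====

-- with an empty deque B emits None for every remaining position
theorem pvBloop_nil_vals (os : List (Option Int)) : pvBloop os [] = os.map (fun _ => none) := by
  induction os with
  | nil => rfl
  | cons b os ih => simp [pvBloop, ih]

theorem pvBloop_all_none (T : List (Option Int)) (h : ∀ x ∈ T, x = none) :
    pvBloop T [] = T := by
  rw [pvBloop_nil_vals]
  induction T with
  | nil => rfl
  | cons b T ih =>
    simp only [List.map_cons]
    rw [h b (by simp), ih (fun x hx => h x (by simp [hx]))]

-- the deque is exhausted after |M| positions
theorem pvBloop_append (M : List (Option Int)) :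
    ∀ (vals : List Int) (rest : List (Option Int)), vals.length ≤ M.length →
    pvBloop (M ++ rest) vals = pvBloop M vals ++ pvBloop rest [] := by
  induction M with
  | nil =>
    intro vals rest h
    have : vals = [] := List.eq_nil_of_length_eq_zero (Nat.le_zero.mp h)
    subst this; simp [pvBloop]
  | cons m M ih =>
    intro vals rest h
    match vals with
    | [] => simp only [List.cons_append, pvBloop]; rw [ih [] rest (by simp)]
    | v :: vs =>
      have hv : vs.length ≤ M.length := by simpa using h
      simp only [List.cons_append, pvBloop]
      by_cases hm : m.isSome
      · simp [hm, ih vs rest hv]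
      · simp [hm, ih ((v :: vs).dropLast) rest (by simpa using hv)]

-- a gap position takes the rightmost deque element
theorem pvBloop_none_concat (os : List (Option Int)) (vals : List Int) (v : Int) :
    pvBloop (none :: os) (vals ++ [v]) = some v :: pvBloop os vals := by
  cases vals with
  | nil => simp [pvBloop]
  | cons w ws =>
    have hd : (w :: (ws ++ [v])).dropLast = w :: ws := by
      show ((w :: ws) ++ [v]).dropLast = w :: ws
      exact List.dropLast_concat ..
    simp [pvBloop, hd]

theorem pvGet_at_len (X : List (Option Int)) (y : Option Int) (Z : List (Option Int)) (d : Option Int) :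
    PySem.List.pyGetD (X ++ y :: Z) (X.length : Int) d = y := by
  rw [PySem.List.pyGetD_natCast]
  induction X with
  | nil => rfl
  | cons x X _ => simp

theorem pvSet_at_len (X : List (Option Int)) (y : Option Int) (Z : List (Option Int)) (v : Option Int) :
    PySem.List.pySetD (X ++ y :: Z) (X.length : Int) v = X ++ v :: Z := by
  rw [PySem.List.pySetD_natCast]
  induction X with
  | nil => rfl
  | cons x X _ => simp

-- main invariant: at state (P ++ S ++ T, i = |P|, j = |P| + |S| - 1), with the
-- region right of j all None, A's loop computes P followed by B's pass over the rest
theorem pvAloop_eq (n : Nat) : ∀ (P S T : List (Option Int)), S.length = n →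
    (∀ x ∈ T, x = none) →
    pvAloop (P ++ S ++ T) (P.length : Int) ((P.length : Int) + (S.length : Int) - 1)
      = P ++ pvBloop (S ++ T) (S.filterMap id) := by
  induction n using Nat.strong_induction_on with
  | _ n ih =>
    intro P S T hlen hT
    by_cases hS : S.length ≤ 1
    · -- loop does not run
      rw [pvAloop]
      have hij : ¬ ((P.length : Int) < (P.length : Int) + (S.length : Int) - 1) := by omega
      rw [dif_neg hij]
      rcases S with _ | ⟨s0, _ | ⟨s1, S''⟩⟩
      · simp [pvBloop_all_none T hT]
      · rcases s0 with _ | v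
        · simp [pvBloop, pvBloop_all_none T hT]
        · simp [pvBloop, pvBloop_all_none T hT]
      · simp at hS
    · -- the loop runs: 2 ≤ |S|
      rcases S with _ | ⟨s0, S'⟩
      · simp at hS
      have hS' : S' ≠ [] := by
        intro h; subst h; simp at hS
      rw [pvAloop]
      have hij : (P.length : Int) < (P.length : Int) + (((s0 :: S').length : Nat) : Int) - 1 := by
        have : 2 ≤ (s0 :: S').length := by
          cases S' with | nil => exact absurd rfl hS' | cons a b => simp
        omega
      rw [dif_pos hij]
      have hget0 : PySem.List.pyGetD (P ++ (s0 :: S') ++ T) ((P.length : Nat) : Int) none = s0 := by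
        simp
      rcases s0 with _ | v
      · -- gap at i: pull from the right end
        rcases List.eq_nil_or_concat S' with hnil | ⟨M, lastv, rfl⟩
        · exact absurd hnil hS'
        simp only [List.concat_eq_append] at hS' hlen hS hij hget0 ⊢
        rw [hget0]
        simp only [reduceIte]
        -- the value at j
        have e1 : P ++ (none :: (M ++ [lastv])) ++ T = (P ++ none :: M) ++ lastv :: T := by simp
        have e2 : ((P.length : Nat) : Int) + (((none :: (M ++ [lastv])).length : Nat) : Int) - 1
            = (((P ++ none :: M).length : Nat) : Int) := by
          simp only [List.length_cons, List.length_append, List.length_cons, List.length_nil]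
          push_cast; omega
        have hgetj : PySem.List.pyGetD (P ++ (none :: (M ++ [lastv])) ++ T)
            (((P.length : Nat) : Int) + (((none :: (M ++ [lastv])).length : Nat) : Int) - 1) none = lastv := by
          rw [e1, e2, pvGet_at_len]
        rw [hgetj]
        -- the two writes
        have hset1 : PySem.List.pySetD (P ++ (none :: (M ++ [lastv])) ++ T) ((P.length : Nat) : Int) lastv
            = P ++ lastv :: (M ++ [lastv] ++ T) := by
          have e3 : P ++ (none :: (M ++ [lastv])) ++ T = P ++ none :: (M ++ [lastv] ++ T) := by simp
          rw [e3, pvSet_at_len]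
        have hset2 : PySem.List.pySetD (P ++ lastv :: (M ++ [lastv] ++ T))
            (((P.length : Nat) : Int) + (((none :: (M ++ [lastv])).length : Nat) : Int) - 1) none
            = (P ++ lastv :: M) ++ none :: T := by
          have e4 : P ++ lastv :: (M ++ [lastv] ++ T) = (P ++ lastv :: M) ++ lastv :: T := by simp
          have e5 : ((P.length : Nat) : Int) + (((none :: (M ++ [lastv])).length : Nat) : Int) - 1
              = (((P ++ lastv :: M).length : Nat) : Int) := by
            simp only [List.length_cons, List.length_append, List.length_cons, List.length_nil]
            push_cast; omega
          rw [e4, e5, pvSet_at_len]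
        rw [hset1, hset2]
        -- the recursive call is the invariant at (P, lastv :: M, none :: T)
        have hTn : ∀ x ∈ (none :: T : List (Option Int)), x = none := by
          intro x hx
          cases hx with
          | head => rfl
          | tail b h => exact hT x h
        have harg : ((P.length : Nat) : Int) + (((none :: (M ++ [lastv])).length : Nat) : Int) - 1 - 1
            = ((P.length : Nat) : Int) + (((lastv :: M).length : Nat) : Int) - 1 := by
          simp only [List.length_cons, List.length_append, List.length_cons, List.length_nil]
          push_cast; omega
        have hrec := ih (lastv :: M).length
          (by simp_all; omega) P (lastv :: M) (none :: T) rfl hTn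
        have e6 : (P ++ lastv :: M) ++ none :: T = P ++ (lastv :: M) ++ (none :: T) := by simp
        rw [e6, harg, hrec]
        -- compare B's pass on (none :: M ++ [lastv]) with the new state
        rcases lastv with _ | v
        · -- the rightmost element was itself None
          simp [List.filterMap_append, pvBloop]
        · -- the rightmost element is a value
          have hfm : (some v :: M : List (Option Int)).filterMap id = v :: M.filterMap id := by
            simp
          have hfm2 : ((none :: (M ++ [some v])) : List (Option Int)).filterMap id
              = M.filterMap id ++ [v] := by
            simp [List.filterMap_append]
          have hL : pvBloop ((some v :: M) ++ (none :: T)) ((some v :: M : List (Option Int)).filterMap id)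
              = some v :: pvBloop (M ++ none :: T) (M.filterMap id) := by
            rw [hfm]; simp [pvBloop]
          have hR : pvBloop ((none :: (M ++ [some v])) ++ T) (((none :: (M ++ [some v])) : List (Option Int)).filterMap id)
              = some v :: pvBloop (M ++ some v :: T) (M.filterMap id) := by
            rw [hfm2]
            have : (none :: (M ++ [some v])) ++ T = none :: (M ++ some v :: T) := by simp
            rw [this, pvBloop_none_concat]
          rw [hL, hR]
          have hlenfm : (M.filterMap id).length ≤ M.length := List.length_filterMap_le _ _
          rw [pvBloop_append M _ (some v :: T) hlenfm, pvBloop_append M _ (none :: T) hlenfm]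
          simp [pvBloop]
      · -- value at i: keep it and advance
        rw [hget0]
        rw [if_neg (by simp)]
        have h1 : P ++ (some v :: S') ++ T = (P ++ [some v]) ++ S' ++ T := by simp
        have h2 : ((P.length : Nat) : Int) + 1 = (((P ++ [some v]).length : Nat) : Int) := by
          simp
        have h3 : ((P.length : Nat) : Int) + (((some v :: S').length : Nat) : Int) - 1
            = (((P ++ [some v]).length : Nat) : Int) + ((S'.length : Nat) : Int) - 1 := by
          simp only [List.length_cons, List.length_append, List.length_cons, List.length_nil]
          push_cast; omega
        rw [h1, h2, h3, ih S'.length (by simp at hlen ⊢; omega) (P ++ [some v]) S' T rfl hT]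
        simp [pvBloop]

-- ===== VERDICT (by name: the statement is the Claim_ definition above) =====
theorem get_updated_file_blocks_fragmented_spec : Claim_equal_get_updated_file_blocks_fragmented := by
  intro fb _
  unfold Spec_get_updated_file_blocks_fragmented get_updated_file_blocks_fragmented get_updated_file_blocks_fragmented_alt
  have := pvAloop_eq fb.length [] fb [] rfl (by simp)
  simpa using this
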